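-- pv_equiv track=rewrite | github.com/Gustixa/redes | Lab 02/Parte 2/receptor.py | check_crc32
-- ===== SOURCE A (Python) =====
-- def check_crc32(data):
-- 	generator = [1, 0, 0, 0, 0, 0, 0, 0, 0, 0, 0, 0, 0, 0, 0, 0, 0, 0, 0, 0, 0, 0, 0, 0, 0, 0, 0, 1, 1, 0, 0, 1]
-- 	crc_data = data[:len(data)-32] + [0] * 32
-- 	for i in range(len(data) - 32):
-- 		if crc_data[i] == 1:
-- 			for j in range(len(generator)):
-- 				crc_data[i + j] ^= generator[j]
-- 	crc = crc_data[-32:]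
-- 	return crc == data[-32:]
-- ===== SOURCE B (Python) =====
-- def check_crc32(data):
--     # bit-serial shift-register CRC: constant-size register, one streaming pass
--     poly = [0] * 26 + [1, 1, 0, 0, 1] + [0]   # generator[1:] padded to width 32
--     reg = [0] * 32
--     for x in data[:len(data) - 32]:
--         b = reg[0]
--         reg = reg[1:] + [0]
--         if x ^ b == 1:
--             reg = [r ^ p for r, p in zip(reg, poly)]
--     return reg == data[-32:]
-- ===== Notes on version B (the rewrite author's own statement) =====
-- stated objective: alternative
-- what changed: Replaces A's in-place long division over a full n-element copy of the message (nested loop XOR-ing the 32-bit generator into the buffer at index i+j) with a streaming bit-serial shift register: one pass over the message keeping only a constant-size 32-entry register that is shifted and XOR-ed with the polynomial, then compared to the trailing 32 bits.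
import Mathlib
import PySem

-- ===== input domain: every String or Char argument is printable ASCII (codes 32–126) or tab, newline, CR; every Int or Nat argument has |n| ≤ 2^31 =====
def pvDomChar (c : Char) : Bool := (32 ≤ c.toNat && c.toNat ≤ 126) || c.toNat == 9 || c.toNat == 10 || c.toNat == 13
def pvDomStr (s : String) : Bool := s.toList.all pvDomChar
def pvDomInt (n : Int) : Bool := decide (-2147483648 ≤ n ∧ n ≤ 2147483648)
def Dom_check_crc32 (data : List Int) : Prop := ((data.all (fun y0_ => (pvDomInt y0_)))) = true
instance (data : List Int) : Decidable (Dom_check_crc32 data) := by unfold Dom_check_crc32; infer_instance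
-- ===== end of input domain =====

-- B replaces A's in-place long division over a full copy of the message by a streaming
-- bit-serial shift register of constant size 32 (alternative data structure, same cost).

-- ===== PORT A =====
-- generator = [1, 0, …, 0, 1, 1, 0, 0, 1]  (32 entries)
def genA : List Int := [1, 0, 0, 0, 0, 0, 0, 0, 0, 0, 0, 0, 0, 0, 0, 0, 0, 0, 0, 0, 0, 0, 0, 0, 0, 0, 0, 1, 1, 0, 0, 1]

-- 'for j in range(len(generator)): crc_data[i+j] ^= generator[j]' — indices i+j are always
-- in range when this loop body runs, so getD/set are exact here
def innerA (i : Nat) (c : List Int) : List Int :=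
  (List.range genA.length).foldl
    (fun c' j => c'.set (i + j) (PySem.Int.bxor (c'.getD (i + j) 0) (genA.getD j 0))) c

-- one iteration of A's outer loop: 'if crc_data[i] == 1: …' (index i always in range)
def stepA (c : List Int) (i : Nat) : List Int :=
  if c.getD i 0 == 1 then innerA i c else c

def check_crc32 (data : List Int) : Bool :=
  -- crc_data = data[:len(data)-32] + [0]*32   (slice stop may be negative: PySem slice)
  let crc_data := PySem.List.slice data none (some ((data.length : Int) - 32)) ++ List.replicate 32 (0 : Int)
  -- for i in range(len(data) - 32): …   (empty when the bound is ≤ 0, as in Python)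
  let crcF := (List.range (data.length - 32)).foldl stepA crc_data
  -- crc = crc_data[-32:] ; return crc == data[-32:]
  PySem.List.slice crcF (some (-32)) none == PySem.List.slice data (some (-32)) none

-- ===== PORT B =====
-- poly = [0]*26 + [1, 1, 0, 0, 1] + [0]
def polyB : List Int := List.replicate 26 0 ++ [1, 1, 0, 0, 1] ++ [0]

-- one iteration of B's loop body; reg always has 32 entries, so reg[0] (getD) is exact,
-- and reg[1:] is drop 1 (a slice with nonnegative start)
def stepB (reg : List Int) (x : Int) : List Int :=
  let b := reg.getD 0 0
  let reg' := reg.drop 1 ++ [0]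
  if PySem.Int.bxor x b == 1 then List.zipWith (fun r p => PySem.Int.bxor r p) reg' polyB else reg'

def check_crc32_alt (data : List Int) : Bool :=
  let reg := (PySem.List.slice data none (some ((data.length : Int) - 32))).foldl stepB (List.replicate 32 (0 : Int))
  reg == PySem.List.slice data (some (-32)) none

-- ===== PRECONDITION & SPEC =====
def Spec_check_crc32 (data : List Int) (out : Bool) : Prop := out = check_crc32_alt data
instance (data : List Int) (out : Bool) : Decidable (Spec_check_crc32 data out) := by unfold Spec_check_crc32; infer_instance

-- ===== CLAIM (what is proved, stated in full; the proofs are below) =====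
def Claim_equal_check_crc32 : Prop := ∀ (data : List Int), Dom_check_crc32 data → Spec_check_crc32 data (check_crc32 data)

-- ===== LEMMAS AND PROOFS =====

-- generator tail (generator[1:]); genA = 1 :: gtailB and polyB = gtailB ++ [0]
def gtailB : List Int := List.replicate 26 0 ++ [1, 1, 0, 0, 1]

abbrev isBit (a : Int) : Prop := a = 0 ∨ a = 1

-- s with its first bs.length entries XOR-masked by bs
def maskL (bs s : List Int) : List Int :=
  List.zipWith (fun d b => PySem.Int.bxor d b) s bs ++ s.drop bs.length

-- register invariant of B's fold
def BitsReg (reg : List Int) : Prop := reg.length = 32 ∧ ∀ x ∈ reg, isBit x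

lemma bxor_one_one (s : Int) : PySem.Int.bxor (PySem.Int.bxor s 1) 1 = s := by
  unfold PySem.Int.bxor
  split
  · split
    · split
      · simp [Nat.xor_xor_cancel_right]
        omega
      · omega
    · omega
  · split
    · split
      · omega
      · set k := (-s - 1).toNat with hk
        have e1 : (-(-((k ^^^ Int.toNat 1 : Nat) : Int) - 1) - 1).toNat = (k ^^^ Int.toNat 1) := by omega
        rw [e1, Nat.xor_xor_cancel_right]
        omega
    · omega

lemma bxor_bit {a b : Int} (ha : isBit a) (hb : isBit b) : isBit (PySem.Int.bxor a b) := by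
  rcases ha with rfl | rfl <;> rcases hb with rfl | rfl <;> [left; right; right; left] <;> decide

lemma bxor_right_assoc {b a : Int} (s : Int) (hb : isBit b) (ha : isBit a) :
    PySem.Int.bxor (PySem.Int.bxor s b) a = PySem.Int.bxor s (PySem.Int.bxor b a) := by
  rcases hb with rfl | rfl <;> rcases ha with rfl | rfl
  · simp [PySem.Int.bxor_zero]
  · have : PySem.Int.bxor (0:Int) 1 = 1 := by decide
    rw [PySem.Int.bxor_zero, this]
  · simp [PySem.Int.bxor_zero]
  · have : PySem.Int.bxor (1:Int) 1 = 0 := by decide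
    rw [this, PySem.Int.bxor_zero, bxor_one_one]

lemma maskL_nil_right (bs : List Int) : maskL bs [] = [] := by simp [maskL]

lemma maskL_cons (b d : Int) (bs s : List Int) :
    maskL (b :: bs) (d :: s) = PySem.Int.bxor d b :: maskL bs s := by simp [maskL]

lemma maskL_length {bs s : List Int} (h : bs.length ≤ s.length) :
    (maskL bs s).length = s.length := by
  simp [maskL]
  omega

lemma maskL_append_zero (bs s : List Int) : maskL (bs ++ [0]) s = maskL bs s := by
  induction bs generalizing s with
  | nil =>
    cases s with
    | nil => simp [maskL]
    | cons d s' => simp [maskL, PySem.Int.bxor_zero]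
  | cons b bs' ih =>
    cases s with
    | nil => simp [maskL]
    | cons d s' =>
      rw [List.cons_append, maskL_cons, maskL_cons, ih]

lemma maskL_comp (a b s : List Int) (ha : ∀ x ∈ a, isBit x) (hb : ∀ x ∈ b, isBit x)
    (hl : a.length = b.length) :
    maskL a (maskL b s) = maskL (List.zipWith (fun r p => PySem.Int.bxor r p) b a) s := by
  induction a generalizing b s with
  | nil =>
    cases b with
    | nil => simp [maskL]
    | cons b0 b' => simp at hl
  | cons a0 a' ih =>
    cases b with
    | nil => simp at hl
    | cons b0 b' =>
      cases s with
      | nil => simp [maskL_nil_right]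
      | cons d s' =>
        rw [maskL_cons, maskL_cons, List.zipWith_cons_cons, maskL_cons]
        rw [bxor_right_assoc d (hb b0 (by simp)) (ha a0 (by simp))]
        rw [ih b' s' (fun x hx => ha x (by simp [hx])) (fun x hx => hb x (by simp [hx])) (by simpa using hl)]

lemma maskL_zeros_left (n : Nat) (s : List Int) : maskL (List.replicate n 0) s = s := by
  induction n generalizing s with
  | zero => simp [maskL]
  | succ n ih =>
    cases s with
    | nil => simp [maskL]
    | cons d s' =>
      rw [List.replicate_succ, maskL_cons, PySem.Int.bxor_zero, ih]

lemma maskL_zeros_right (bs : List Int) : maskL bs (List.replicate bs.length 0) = bs := by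
  induction bs with
  | nil => simp [maskL]
  | cons b bs' ih =>
    rw [List.length_cons, List.replicate_succ, maskL_cons]
    have : PySem.Int.bxor 0 b = b := by rw [PySem.Int.bxor_comm, PySem.Int.bxor_zero]
    rw [this, ih]

lemma zipWith_bits {a b : List Int} (ha : ∀ x ∈ a, isBit x) (hb : ∀ x ∈ b, isBit x) :
    ∀ y ∈ List.zipWith (fun r p => PySem.Int.bxor r p) a b, isBit y := by
  induction a generalizing b with
  | nil => simp
  | cons a0 a' ih =>
    cases b with
    | nil => simp
    | cons b0 b' =>
      intro y hy
      rw [List.zipWith_cons_cons, List.mem_cons] at hy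
      rcases hy with rfl | hy
      · exact bxor_bit (ha a0 (by simp)) (hb b0 (by simp))
      · exact ih (fun x hx => ha x (by simp [hx])) (fun x hx => hb x (by simp [hx])) y hy

lemma stepB_inv {reg : List Int} (x : Int) (h : BitsReg reg) : BitsReg (stepB reg x) := by
  obtain ⟨hlen, hbits⟩ := h
  cases reg with
  | nil => simp at hlen
  | cons b rt =>
    have hrt : ∀ y ∈ rt ++ [(0:Int)], isBit y := by
      intro y hy
      rcases List.mem_append.1 hy with hy | hy
      · exact hbits y (by simp [hy])
      · simp at hy; subst hy; exact Or.inl rfl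
    have hlen' : (rt ++ [(0:Int)]).length = 32 := by simp at hlen ⊢; omega
    unfold stepB
    simp only [List.getD_cons_zero, List.drop_succ_cons, List.drop_zero]
    split
    · refine ⟨?_, ?_⟩
      · rw [List.length_zipWith, hlen']; decide
      · exact zipWith_bits hrt (by decide)
    · exact ⟨hlen', hrt⟩

lemma foldB_inv (xs : List Int) {reg : List Int} (h : BitsReg reg) :
    BitsReg (xs.foldl stepB reg) := by
  induction xs generalizing reg with
  | nil => exact h
  | cons x xs' ih => exact ih (stepB_inv x h)

-- the inner loop of A XOR-masks g onto the first g.length entries after position junk.length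
lemma inner_eq (g : List Int) : ∀ (junk s : List Int), g.length ≤ s.length →
    (List.range g.length).foldl
      (fun c' j => c'.set (junk.length + j)
        (PySem.Int.bxor (c'.getD (junk.length + j) 0) (g.getD j 0))) (junk ++ s)
    = junk ++ maskL g s := by
  induction g with
  | nil => intro junk s _; simp [maskL]
  | cons a g' ih =>
    intro junk s hlen
    cases s with
    | nil => simp at hlen
    | cons d s' =>
      rw [List.length_cons, List.range_succ_eq_map, List.foldl_cons, List.foldl_map]
      have h1 : (junk ++ d :: s').set (junk.length + 0)
          (PySem.Int.bxor ((junk ++ d :: s').getD (junk.length + 0) 0) ((a :: g').getD 0 0))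
          = (junk ++ [PySem.Int.bxor d a]) ++ s' := by
        have hg : (junk ++ d :: s').getD (junk.length + 0) 0 = d := by
          simp [List.getD]
        rw [hg, List.getD_cons_zero, Nat.add_zero, List.set_append]
        simp
      rw [h1]
      have h2 : (fun (c' : List Int) (j : Nat) => c'.set (junk.length + Nat.succ j)
            (PySem.Int.bxor (c'.getD (junk.length + Nat.succ j) 0) ((a :: g').getD (Nat.succ j) 0)))
          = (fun (c' : List Int) (j : Nat) => c'.set ((junk ++ [PySem.Int.bxor d a]).length + j)
            (PySem.Int.bxor (c'.getD ((junk ++ [PySem.Int.bxor d a]).length + j) 0) (g'.getD j 0))) := by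
        funext c' j
        have e : junk.length + Nat.succ j = (junk ++ [PySem.Int.bxor d a]).length + j := by
          simp
          omega
        rw [e, List.getD_cons_succ]
      rw [h2, ih (junk ++ [PySem.Int.bxor d a]) s' (by simp at hlen ⊢; omega)]
      rw [maskL_cons]
      simp

lemma innerA_eq (junk s : List Int) (h : genA.length ≤ s.length) :
    innerA junk.length (junk ++ s) = junk ++ maskL genA s := by
  unfold innerA
  exact inner_eq genA junk s h

-- main invariant: A's outer fold keeps the state as (dead prefix) ++ (suffix masked by B's register)
lemma outer_eq : ∀ (t : Nat) (junk reg s : List Int), BitsReg reg → t + 32 ≤ s.length →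
    ∃ junk', junk'.length = junk.length + t ∧
      (List.range' junk.length t).foldl stepA (junk ++ maskL reg s)
        = junk' ++ maskL ((s.take t).foldl stepB reg) (s.drop t) := by
  intro t
  induction t with
  | zero =>
    intro junk reg s _ _
    exact ⟨junk, by simp, by simp⟩
  | succ t' ih =>
    intro junk reg s hreg hlen
    obtain ⟨hrl, hrb⟩ := hreg
    cases s with
    | nil => simp at hlen
    | cons x s₂ =>
      cases reg with
      | nil => simp at hrl
      | cons b rt =>
        have hrt_len : rt.length = 31 := by simpa using hrl
        have hs₂' : t' + 32 ≤ s₂.length := by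
          have h := hlen
          simp at h
          omega
        have hs₂ : 32 ≤ s₂.length := by omega
        have hrt_bits : ∀ y ∈ rt, isBit y := fun y hy => hrb y (by simp [hy])
        have hmlen : (maskL rt s₂).length = s₂.length := maskL_length (by omega)
        have hget : (junk ++ PySem.Int.bxor x b :: maskL rt s₂).getD junk.length 0
            = PySem.Int.bxor x b := by simp [List.getD]
        have hstepB : stepB (b :: rt) x =
            if PySem.Int.bxor x b == 1
            then List.zipWith (fun r p => PySem.Int.bxor r p) (rt ++ [0]) polyB
            else rt ++ [0] := by
          unfold stepB
          simp
        have hregB : BitsReg (stepB (b :: rt) x) := stepB_inv x ⟨hrl, hrb⟩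
        rw [maskL_cons, List.range'_succ, List.foldl_cons]
        rw [List.take_succ_cons, List.drop_succ_cons, List.foldl_cons]
        by_cases hc : PySem.Int.bxor x b = 1
        · -- the XOR branch is taken
          have hcond : stepA (junk ++ PySem.Int.bxor x b :: maskL rt s₂) junk.length
              = innerA junk.length (junk ++ PySem.Int.bxor x b :: maskL rt s₂) := by
            unfold stepA
            rw [hget, if_pos (by simp [hc])]
          have hIA : innerA junk.length (junk ++ PySem.Int.bxor x b :: maskL rt s₂)
              = junk ++ maskL genA (PySem.Int.bxor x b :: maskL rt s₂) :=
            innerA_eq junk _ (by simp [genA, hmlen]; omega)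
          have hgen : genA = (1 : Int) :: gtailB := by decide
          have hcomp : maskL gtailB (maskL rt s₂)
              = maskL (List.zipWith (fun r p => PySem.Int.bxor r p) rt gtailB) s₂ :=
            maskL_comp gtailB rt s₂ (by decide) hrt_bits (by rw [hrt_len]; decide)
          have hzip : List.zipWith (fun r p => PySem.Int.bxor r p) (rt ++ [0]) polyB
              = List.zipWith (fun r p => PySem.Int.bxor r p) rt gtailB ++ [0] := by
            have hp : polyB = gtailB ++ [0] := by decide
            rw [hp, List.zipWith_append (by rw [hrt_len]; decide)]
            simp
          have hsB : stepB (b :: rt) x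
              = List.zipWith (fun r p => PySem.Int.bxor r p) rt gtailB ++ [0] := by
            rw [hstepB, if_pos (by simp [hc]), hzip]
          have hregB' : BitsReg (List.zipWith (fun r p => PySem.Int.bxor r p) rt gtailB ++ [0]) := by
            rw [← hsB]; exact hregB
          obtain ⟨junk'', hl'', heq''⟩ := ih (junk ++ [PySem.Int.bxor (PySem.Int.bxor x b) 1])
            (List.zipWith (fun r p => PySem.Int.bxor r p) rt gtailB ++ [0]) s₂ hregB' hs₂'
          refine ⟨junk'', by simp at hl''; omega, ?_⟩
          rw [hcond, hIA, hgen, maskL_cons, hcomp, ← maskL_append_zero, hsB]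
          rw [← heq'']
          have hjl : (junk ++ [PySem.Int.bxor (PySem.Int.bxor x b) 1]).length = junk.length + 1 := by
            simp
          rw [hjl]
          simp
        · -- no XOR: the state is unchanged
          have hcond : stepA (junk ++ PySem.Int.bxor x b :: maskL rt s₂) junk.length
              = junk ++ PySem.Int.bxor x b :: maskL rt s₂ := by
            unfold stepA
            rw [hget, if_neg (by simp [hc])]
          have hsB : stepB (b :: rt) x = rt ++ [0] := by
            rw [hstepB, if_neg (by simp [hc])]
          have hregB' : BitsReg (rt ++ [(0:Int)]) := by rw [← hsB]; exact hregB
          obtain ⟨junk'', hl'', heq''⟩ := ih (junk ++ [PySem.Int.bxor x b])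
            (rt ++ [0]) s₂ hregB' hs₂'
          refine ⟨junk'', by simp at hl''; omega, ?_⟩
          rw [hcond, hsB, ← heq'']
          have hjl : (junk ++ [PySem.Int.bxor x b]).length = junk.length + 1 := by simp
          rw [hjl, maskL_append_zero]
          simp

lemma beq_false_of_len (data : List Int) (hd : data.length < 32) :
    ∀ (l : List Int), l.length = 32 → (l == data) = false := by
  intro l hl
  rw [beq_eq_false_iff_ne]
  intro h
  rw [h] at hl
  omega

lemma hbits0 : BitsReg (List.replicate 32 (0:Int)) := by
  refine ⟨by simp, ?_⟩
  intro y hy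
  rw [List.eq_of_mem_replicate hy]
  exact Or.inl rfl

theorem check_crc32_spec : Claim_equal_check_crc32 := by
  unfold Claim_equal_check_crc32 Spec_check_crc32
  intro data _
  unfold check_crc32 check_crc32_alt
  dsimp only
  have hslice32 : ∀ (xs : List Int),
      PySem.List.slice xs (some (-32)) none = xs.drop (xs.length - 32) :=
    fun xs => PySem.List.slice_from_neg_ofNat xs 32 (by norm_num)
  by_cases hn : 32 ≤ data.length
  · -- messages of length ≥ 32: the stop index of data[:len(data)-32] is nonnegative
    have hmsg : PySem.List.slice data none (some ((data.length : Int) - 32))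
        = data.take (data.length - 32) := by
      have hb : (0:Int) ≤ (data.length : Int) - 32 := by omega
      rw [PySem.List.slice_to data hb]
      congr 1
      omega
    rw [hmsg, hslice32 data]
    set m := data.length - 32 with hm
    set crc0 := data.take m ++ List.replicate 32 (0:Int) with hcrc0
    have htl : (data.take m).length = m := by simp [hm]
    have hc0len : crc0.length = m + 32 := by rw [hcrc0]; simp [htl]
    obtain ⟨junk', hjl, heq⟩ := outer_eq m [] (List.replicate 32 0) crc0 hbits0 (by omega)
    set regF := (data.take m).foldl stepB (List.replicate 32 (0:Int)) with hregFd
    have hregF : BitsReg regF := foldB_inv _ hbits0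
    have h1 : crc0.take m = data.take m := by rw [hcrc0]; exact List.take_left' htl
    have h2 : crc0.drop m = List.replicate 32 0 := by rw [hcrc0]; exact List.drop_left' htl
    have h3 : maskL regF (List.replicate 32 0) = regF := by
      rw [← hregF.1]
      exact maskL_zeros_right regF
    have hfold : (List.range (data.length - 32)).foldl stepA crc0 = junk' ++ regF := by
      have hrange : List.range (data.length - 32) = List.range' ([]:List Int).length m := by
        simp [List.range_eq_range', hm]
      have hinit : crc0 = ([] : List Int) ++ maskL (List.replicate 32 0) crc0 := by
        rw [maskL_zeros_left]
        rfl
      rw [hrange]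
      conv_lhs => rw [hinit]
      rw [heq, h1, h2, h3]
    rw [hfold, hslice32 (junk' ++ regF)]
    have hlen4 : (junk' ++ regF).length - 32 = junk'.length := by
      simp [hregF.1]
    rw [hlen4, List.drop_left]
  · -- messages shorter than 32 bits: both sides compare a 32-entry list with data, hence false
    have hd : data.length < 32 := by omega
    have hz : data.length - 32 = 0 := by omega
    have hdrop : data.drop (data.length - 32) = data := by rw [hz, List.drop_zero]
    rw [hz, List.range_zero, List.foldl_nil, hslice32, hslice32 data, hdrop]
    set msgA := PySem.List.slice data none (some ((data.length : Int) - 32)) with hmsgA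
    have hlenA : (msgA ++ List.replicate 32 (0:Int)).length - 32 = msgA.length := by
      simp
    rw [hlenA, List.drop_left]
    have hB : BitsReg (msgA.foldl stepB (List.replicate 32 (0:Int))) := foldB_inv _ hbits0
    rw [beq_false_of_len data hd _ (by simp), beq_false_of_len data hd _ hB.1]
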